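-- pv_equiv track=rewrite | github.com/mt-andrea/py | érettségi feladatok/4_Celloveszet/loves.py | loertek
-- ===== SOURCE A (Python) =====
-- def loertek(sor):
--     aktpont=20
--     ertek=0
--     for i in range(len(sor)):
--         if aktpont>0 and sor[i]=="-":
--             aktpont-=1
--         else:
--             ertek+=aktpont
--     return ertek
-- ===== SOURCE B (Python) =====
-- def loertek(sor):
--     # Split on dashes: the segment with index k follows exactly k dashes,
--     # so each of its characters scores max(0, 20 - k).
--     return sum(max(0, 20 - k) * len(part) for k, part in enumerate(sor.split("-")))
-- ===== Notes on version B (the rewrite author's own statement) =====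
-- stated objective: faster
-- what changed: Replaces the countdown-accumulator per-character Python loop with one C-level str.split on the dash separator followed by a weighted segment-length sum: segment k (after k dashes) contributes max(0, 20 - k) * len(segment).
import Mathlib
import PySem

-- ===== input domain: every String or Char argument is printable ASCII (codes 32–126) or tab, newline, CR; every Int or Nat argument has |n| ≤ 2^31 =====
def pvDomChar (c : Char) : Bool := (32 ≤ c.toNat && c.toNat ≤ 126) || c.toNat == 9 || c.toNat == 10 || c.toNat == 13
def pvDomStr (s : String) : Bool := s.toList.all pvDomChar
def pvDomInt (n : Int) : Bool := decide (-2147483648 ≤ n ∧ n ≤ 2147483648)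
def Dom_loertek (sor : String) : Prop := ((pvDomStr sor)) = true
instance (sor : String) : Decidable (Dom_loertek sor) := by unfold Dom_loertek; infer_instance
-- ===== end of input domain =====

-- B replaces A's countdown-accumulator character loop with split('-') plus a weighted
-- count per segment (idiomatic; same asymptotic cost).


-- ===== PORT A =====
-- for i in range(len(sor)) visiting sor[i] in order = a left fold over the characters;
-- state (aktpont, ertek), branch order as in A.
def loertek (sor : String) : Int :=
  (sor.toList.foldl
    (fun (st : Int × Int) c =>
      if st.1 > 0 && c == '-' then (st.1 - 1, st.2) else (st.1, st.2 + st.1))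
    (20, 0)).2

-- ===== PORT B =====
-- sor.split("-") with the one-character separator is List.splitOn '-' on the characters;
-- enumerate + sum is a fold over zipIdx.
def loertek_alt (sor : String) : Int :=
  (List.splitOn '-' sor.toList).zipIdx.foldl
    (fun total pk => total + max 0 (20 - (pk.2 : Int)) * pk.1.length) 0

-- ===== PRECONDITION & SPEC =====
def Spec_loertek (sor : String) (out : Int) : Prop := out = loertek_alt sor
instance (sor : String) (out : Int) : Decidable (Spec_loertek sor out) := by unfold Spec_loertek; infer_instance

-- ===== CLAIM (what is proved, stated in full; the proofs are below) =====
def Claim_equal_loertek : Prop := ∀ (sor : String), Dom_loertek sor → Spec_loertek sor (loertek sor)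

-- ===== LEMMAS AND PROOFS =====

-- weighted sum of segments starting at dash-count d
def pvBsum (d : ℕ) : List (List Char) → Int
  | [] => 0
  | p :: ps => max 0 (20 - (d : Int)) * p.length + pvBsum (d + 1) ps

theorem pvBsum_modifyHead (d : ℕ) (c : Char) (p : List Char) (ps : List (List Char)) :
    pvBsum d (List.modifyHead (List.cons c) (p :: ps))
      = max 0 (20 - (d : Int)) + pvBsum d (p :: ps) := by
  simp [pvBsum]; ring

theorem pvFoldA (cs : List Char) : ∀ (d : ℕ) (e : Int),
    (cs.foldl
      (fun (st : Int × Int) c =>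
        if st.1 > 0 && c == '-' then (st.1 - 1, st.2) else (st.1, st.2 + st.1))
      (max 0 (20 - (d : ℕ) : Int), e)).2
    = e + pvBsum d (List.splitOn '-' cs) := by
  induction cs with
  | nil => intro d e; simp [List.splitOn_nil, pvBsum]
  | cons c cs ih =>
    intro d e
    by_cases hc : c = '-'
    · subst hc
      have hstep : (if max 0 (20 - (d : Int)) > 0 && ('-' == '-') then
            (max 0 (20 - (d : Int)) - 1, e) else (max 0 (20 - (d : Int)), e + max 0 (20 - (d : Int))))
          = (max 0 (20 - ((d : Int) + 1)), e) := by
        split_ifs with h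
        · simp only [beq_self_eq_true, Bool.and_true, decide_eq_true_eq] at h
          have hm : max 0 (20 - (d : Int)) - 1 = max 0 (20 - ((d : Int) + 1)) := by omega
          rw [hm]
        · simp only [beq_self_eq_true, Bool.and_true, decide_eq_true_eq] at h
          have h0 : max 0 (20 - (d : Int)) = 0 := by omega
          have h2 : max 0 (20 - ((d : Int) + 1)) = 0 := by omega
          rw [h0, h2]
          norm_num
      have hih := ih (d + 1) e
      push_cast at hih
      rw [List.foldl_cons, hstep, hih]
      have hs : List.splitOn '-' ('-' :: cs) = [] :: List.splitOn '-' cs := by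
        simp [List.splitOn, List.splitOnP_cons]
      rw [hs]
      simp [pvBsum]
    · have hsplit : List.splitOn '-' (c :: cs)
          = List.modifyHead (List.cons c) (List.splitOn '-' cs) := by
        simp [List.splitOn, List.splitOnP_cons, hc]
      have hne : List.splitOn '-' cs ≠ [] := by
        simp [List.splitOn]; exact List.splitOnP_ne_nil _ _
      obtain ⟨p, ps, hps⟩ := List.exists_cons_of_ne_nil hne
      have hstep : (if max 0 (20 - (d : Int)) > 0 && (c == '-') then
            (max 0 (20 - (d : Int)) - 1, e) else (max 0 (20 - (d : Int)), e + max 0 (20 - (d : Int))))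
          = (max 0 (20 - (d : Int)), e + max 0 (20 - (d : Int))) := by
        simp [hc]
      rw [List.foldl_cons, hstep, ih d _, hsplit, hps, pvBsum_modifyHead]
      ring

theorem pvFoldB (ps : List (List Char)) : ∀ (d : ℕ) (t : Int),
    ((ps.zipIdx d).foldl
      (fun total pk => total + max 0 (20 - (pk.2 : Int)) * pk.1.length) t)
    = t + pvBsum d ps := by
  induction ps with
  | nil => intro d t; simp [pvBsum]
  | cons p ps ih =>
    intro d t
    rw [List.zipIdx_cons, List.foldl_cons, ih (d + 1)]
    simp [pvBsum]; ring

-- ===== VERDICT (by name: the statement is the Claim_ definition above) =====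
theorem loertek_spec : Claim_equal_loertek := by
  intro sor _
  unfold Spec_loertek loertek loertek_alt
  have hA := pvFoldA sor.toList 0 0
  rw [(by decide : max 0 (20 - ((0 : ℕ) : Int)) = 20)] at hA
  rw [hA, pvFoldB]
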